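-- pv_equiv track=rewrite | github.com/ns-bguide/ICD10cm-IntegratedPipeline | scripts/validate.py | _check_combo
-- ===== SOURCE A (Python) =====
-- def _check_combo(combo, token_to_terms):
--     """Check if all tokens in a combo co-occur in at least one ICD term."""
--     sets = []
--     for token in combo:
--         for word in token.lower().split():
--             s = token_to_terms.get(word)
--             if not s:
--                 return False
--             sets.append(s)
--     sets.sort(key=len)
--     result = set(sets[0])
--     for s in sets[1:]:
--         result &= s
--         if not result:
--             return False
--     return True
-- ===== SOURCE B (Python) =====
-- def _check_combo(combo, token_to_terms):
--     """Check if all tokens in a combo co-occur in at least one ICD term."""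
--     words = [w for t in combo for w in t.lower().split()]
--     sets = [token_to_terms.get(w, set()) for w in words]
--     if not all(sets):
--         return False
--     first = sets[0]  # IndexError when the combo has no words, as in A
--     return any(all(t in s for s in sets) for t in first)
-- ===== Notes on version B (the rewrite author's own statement) =====
-- stated objective: alternative
-- what changed: B gathers the word sets with flat comprehensions and a single all() validity check, then decides co-occurrence by probing each term of the first set for membership in every set (any/all), instead of A's early-return collection loop followed by sorting the sets by size and AND-folding a running intersection set.
import Mathlib
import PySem

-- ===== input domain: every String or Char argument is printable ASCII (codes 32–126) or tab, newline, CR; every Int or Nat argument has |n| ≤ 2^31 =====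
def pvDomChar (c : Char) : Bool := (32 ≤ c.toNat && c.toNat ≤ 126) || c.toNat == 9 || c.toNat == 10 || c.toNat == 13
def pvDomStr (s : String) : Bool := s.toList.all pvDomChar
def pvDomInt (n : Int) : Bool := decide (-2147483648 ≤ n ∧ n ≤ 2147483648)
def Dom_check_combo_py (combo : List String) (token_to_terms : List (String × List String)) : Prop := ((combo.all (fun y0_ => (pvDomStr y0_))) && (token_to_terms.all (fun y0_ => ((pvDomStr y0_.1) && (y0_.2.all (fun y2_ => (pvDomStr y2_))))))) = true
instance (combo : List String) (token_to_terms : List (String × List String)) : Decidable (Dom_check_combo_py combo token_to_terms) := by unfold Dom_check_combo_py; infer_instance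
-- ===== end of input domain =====

-- B replaces A's sort-and-intersect loop by per-term membership probes (any/all) over
-- comprehension-built word sets: a different decomposition of the same co-occurrence test.


-- ===== PORT A =====
-- one step of A's inner word loop: look the word up, fail on a missing/empty set, else append
def pvStepA (d : List (String × List String)) (acc : Option (List (List String))) (word : String) : Option (List (List String)) :=
  match acc with
  | none => none
  | some sets =>
    match (PySem.Dict.mk d).get? word with
    | none => none                 -- `s` is None: "if not s: return False"
    | some s => if s.isEmpty then none else some (sets ++ [s])

-- A's collection loop (none = the early `return False`)
def pvCollectA (combo : List String) (d : List (String × List String)) : Option (List (List String)) :=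
  combo.foldl (fun acc token => (PySem.Str.split₀ (PySem.Str.lower token)).foldl (pvStepA d) acc) (some [])

-- A's `for s in sets[1:]: result &= s; if not result: return False` then `return True`
def pvInterLoopA : List (List String) → List String → Bool
  | [], _ => true
  | s :: rest, result =>
    let r := PySem.Set.inter result s
    if r.isEmpty then false else pvInterLoopA rest r

def check_combo_py (combo : List String) (token_to_terms : List (String × List String)) : Bool :=
  match pvCollectA combo token_to_terms with
  | none => false
  | some sets =>
    match PySem.List.pyGet? (PySem.List.sorted sets (fun s => (s.length : Int)) false) 0 with
    | none => false                -- Python raises IndexError on sets[0]; excluded by Pre_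
    | some s0 =>
      pvInterLoopA (PySem.List.slice (PySem.List.sorted sets (fun s => (s.length : Int)) false) (some 1)) (PySem.Set.ofList s0)

-- ===== PORT B =====
-- `words = [w for t in combo for w in t.lower().split()]`
def pvWordsB (combo : List String) : List String :=
  combo.flatMap (fun t => PySem.Str.split₀ (PySem.Str.lower t))

-- `sets = [token_to_terms.get(w, set()) for w in words]`
def pvSetsB (combo : List String) (d : List (String × List String)) : List (List String) :=
  (pvWordsB combo).map (fun w => (PySem.Dict.mk d).getD w [])

def check_combo_py_alt (combo : List String) (token_to_terms : List (String × List String)) : Bool :=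
  if !(pvSetsB combo token_to_terms).all (fun s => !s.isEmpty) then false
  else
    match PySem.List.pyGet? (pvSetsB combo token_to_terms) 0 with
    | none => false                -- Python raises IndexError on sets[0]; excluded by Pre_
    | some first => first.any (fun t => (pvSetsB combo token_to_terms).all (fun s => s.contains t))

-- ===== PRECONDITION & SPEC =====
-- Pre_ excludes exactly the inputs (combo contains no words at all) on which the Python A
-- raises IndexError at `sets[0]` (B raises there too).
def Pre_check_combo_py (combo : List String) (token_to_terms : List (String × List String)) : Prop :=
  ∃ token ∈ combo, PySem.Str.split₀ (PySem.Str.lower token) ≠ []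
instance (combo : List String) (token_to_terms : List (String × List String)) : Decidable (Pre_check_combo_py combo token_to_terms) := by unfold Pre_check_combo_py; infer_instance
def pvWitness_check_combo_py : List String × (List (String × List String)) := (["Flu shot"], [("flu", ["a b"]), ("shot", ["a b", "c"])])
def Spec_check_combo_py (combo : List String) (token_to_terms : List (String × List String)) (out : Bool) : Prop := out = check_combo_py_alt combo token_to_terms
instance (combo : List String) (token_to_terms : List (String × List String)) (out : Bool) : Decidable (Spec_check_combo_py combo token_to_terms out) := by unfold Spec_check_combo_py; infer_instance

-- ===== CLAIM (what is proved, stated in full; the proofs are below) =====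
def Claim_equal_check_combo_py : Prop := ∀ (combo : List String) (token_to_terms : List (String × List String)), Dom_check_combo_py combo token_to_terms → Pre_check_combo_py combo token_to_terms → Spec_check_combo_py combo token_to_terms (check_combo_py combo token_to_terms)

-- ===== LEMMAS AND PROOFS =====

-- truthiness of a looked-up set, as B's `getD _ []` sees it
theorem pvGood_iff (d : List (String × List String)) (w : String) :
    ((PySem.Dict.mk d).getD w [] ≠ []) ↔
      ∃ s, (PySem.Dict.mk d).get? w = some s ∧ s ≠ [] := by
  rw [PySem.Dict.getD_eq_get?_getD]
  cases h : (PySem.Dict.mk d).get? w with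
  | none => simp
  | some s => simp

theorem pvStepA_none (d : List (String × List String)) (ws : List String) :
    ws.foldl (pvStepA d) none = none := by
  induction ws with
  | nil => rfl
  | cons w ws ih => simpa [pvStepA] using ih

-- A's collection loop, characterised over the flat word list
theorem pvCollect_foldl (ws : List String) (d : List (String × List String))
    (sets0 : List (List String)) :
    ws.foldl (pvStepA d) (some sets0) =
      if ∀ w ∈ ws, (PySem.Dict.mk d).getD w [] ≠ []
      then some (sets0 ++ ws.map (fun w => (PySem.Dict.mk d).getD w []))
      else none := by
  induction ws generalizing sets0 with
  | nil => simp
  | cons w ws ih =>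
    simp only [List.foldl_cons]
    by_cases hw : (PySem.Dict.mk d).getD w [] ≠ []
    · obtain ⟨s, hs, hne⟩ := (pvGood_iff d w).mp hw
      have hstep : pvStepA d (some sets0) w = some (sets0 ++ [s]) := by
        simp [pvStepA, hs, List.isEmpty_iff, hne]
      have hsval : (PySem.Dict.mk d).getD w [] = s := by
        rw [PySem.Dict.getD_eq_get?_getD, hs]; rfl
      rw [hstep, ih]
      by_cases hrest : ∀ x ∈ ws, (PySem.Dict.mk d).getD x [] ≠ []
      · have h1 : ∀ x ∈ w :: ws, (PySem.Dict.mk d).getD x [] ≠ [] := by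
          intro x hx
          rcases List.mem_cons.mp hx with h | h
          · exact h ▸ hw
          · exact hrest x h
        rw [if_pos hrest, if_pos h1]
        simp [hsval]
      · have h2 : ¬ ∀ x ∈ w :: ws, (PySem.Dict.mk d).getD x [] ≠ [] :=
          fun hall => hrest fun x hx => hall x (List.mem_cons_of_mem _ hx)
        rw [if_neg hrest, if_neg h2]
    · have hstep : pvStepA d (some sets0) w = none := by
        rcases hcase : (PySem.Dict.mk d).get? w with _ | s
        · simp [pvStepA, hcase]
        · have : s = [] := by
            by_contra hne
            exact hw ((pvGood_iff d w).mpr ⟨s, hcase, hne⟩)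
          simp [pvStepA, hcase, this]
      have h2 : ¬ ∀ x ∈ w :: ws, (PySem.Dict.mk d).getD x [] ≠ [] :=
        fun hall => hw (hall w List.mem_cons_self)
      rw [hstep, pvStepA_none, if_neg h2]

theorem pvCollectA_eq (combo : List String) (d : List (String × List String)) :
    pvCollectA combo d =
      if ∀ w ∈ pvWordsB combo, (PySem.Dict.mk d).getD w [] ≠ []
      then some (pvSetsB combo d)
      else none := by
  have h := List.foldl_flatMap (f := fun t => PySem.Str.split₀ (PySem.Str.lower t))
    (g := pvStepA d) (l := combo) (init := (some [] : Option (List (List String))))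
  unfold pvCollectA pvSetsB pvWordsB
  rw [← h, pvCollect_foldl]
  simp

-- A's intersection loop returns true iff some element of `result` is in every remaining set
theorem pvInterLoopA_true (rest : List (List String)) (result : List String)
    (hres : result ≠ []) :
    pvInterLoopA rest result = true ↔ ∃ t ∈ result, ∀ s ∈ rest, t ∈ s := by
  induction rest generalizing result with
  | nil =>
    rcases result with _ | ⟨t, r⟩
    · exact absurd rfl hres
    · simp [pvInterLoopA]
  | cons s rest ih =>
    simp only [pvInterLoopA]
    by_cases hr : (PySem.Set.inter result s).isEmpty
    · have hempty : PySem.Set.inter result s = [] := by simpa [List.isEmpty_iff] using hr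
      simp only [hr, if_pos]
      constructor
      · intro h; cases h
      · rintro ⟨t, ht, hall⟩
        have : t ∈ PySem.Set.inter result s :=
          (PySem.Set.mem_inter _ _ _).mpr ⟨ht, hall s List.mem_cons_self⟩
        rw [hempty] at this; cases this
    · have hne : PySem.Set.inter result s ≠ [] := by
        intro h; apply hr; simp [h]
      simp only [hr, if_neg, Bool.not_eq_true]
      rw [ih _ hne]
      constructor
      · rintro ⟨t, ht, hall⟩
        obtain ⟨ht1, ht2⟩ := (PySem.Set.mem_inter _ _ _).mp ht
        refine ⟨t, ht1, fun s' hs' => ?_⟩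
        rcases List.mem_cons.mp hs' with h | h
        · exact h ▸ ht2
        · exact hall s' h
      · rintro ⟨t, ht, hall⟩
        exact ⟨t, (PySem.Set.mem_inter _ _ _).mpr ⟨ht, hall s List.mem_cons_self⟩,
          fun s' hs' => hall s' (List.mem_cons_of_mem _ hs')⟩

-- ===== VERDICT (by name: the statement is the Claim_ definition above) =====
theorem check_combo_py_spec : Claim_equal_check_combo_py := by
  intro combo d _hdom hpre
  unfold Spec_check_combo_py check_combo_py check_combo_py_alt
  by_cases hgood : ∀ w ∈ pvWordsB combo, (PySem.Dict.mk d).getD w [] ≠ []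
  · have hval : pvCollectA combo d = some (pvSetsB combo d) := by
      rw [pvCollectA_eq, if_pos hgood]
    rw [hval]
    cases hsnil : pvSetsB combo d with
    | nil =>
      -- impossible under Pre_: the combo has a word
      exfalso
      obtain ⟨tok, htok, hne⟩ := hpre
      have hwnil : pvWordsB combo = [] := by
        have := hsnil
        unfold pvSetsB at this
        exact List.map_eq_nil_iff.mp this
      exact hne (List.flatMap_eq_nil_iff.mp hwnil tok htok)
    | cons s0 srest =>
      have hmemset : ∀ s, s ∈ s0 :: srest ↔ s ∈ pvSetsB combo d := by
        intro s; rw [hsnil]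
      have hmemne : ∀ s ∈ s0 :: srest, s ≠ [] := by
        intro s hs
        obtain ⟨w, hw, rfl⟩ := List.mem_map.mp ((hmemset s).mp hs)
        exact hgood w hw
      have hBcond : ((s0 :: srest).all fun s => !s.isEmpty) = true := by
        simp only [List.all_eq_true]
        intro s hs
        simpa [List.isEmpty_iff] using hmemne s hs
      rw [hBcond]
      show (match PySem.List.pyGet? (PySem.List.sorted (s0 :: srest) (fun s => (s.length : Int)) false) 0 with
            | none => false
            | some s0' =>
              pvInterLoopA (PySem.List.slice (PySem.List.sorted (s0 :: srest) (fun s => (s.length : Int)) false) (some 1)) (PySem.Set.ofList s0')) =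
          (match PySem.List.pyGet? (s0 :: srest) 0 with
            | none => false
            | some first => first.any fun t => (s0 :: srest).all fun s => s.contains t)
      rcases hsort : PySem.List.sorted (s0 :: srest) (fun s => (s.length : Int)) false with _ | ⟨m, tail⟩
      · exact absurd ((PySem.List.sorted_eq_nil_iff _ _ _).mp hsort) (List.cons_ne_nil _ _)
      have hmmem : m ∈ s0 :: srest := by
        rw [← PySem.List.mem_sorted (s0 :: srest) (fun s => (s.length : Int)) false, hsort]
        exact List.mem_cons_self
      have hmne : m ≠ [] := hmemne m hmmem
      have hofne : PySem.Set.ofList m ≠ [] := by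
        rcases m with _ | ⟨x, xs⟩
        · exact absurd rfl hmne
        · intro h
          have : x ∈ PySem.Set.ofList (x :: xs) := (PySem.Set.mem_ofList _ _).mpr List.mem_cons_self
          rw [h] at this; cases this
      have hgetA : PySem.List.pyGet? (m :: tail) 0 = some m := by
        simp [PySem.List.pyGet?, PySem.List.pyIdx?]
      have hgetB : PySem.List.pyGet? (s0 :: srest) 0 = some s0 := by
        simp [PySem.List.pyGet?, PySem.List.pyIdx?]
      have hslice : PySem.List.slice (m :: tail) (some 1) = tail := by
        rw [PySem.List.slice_from _ (by norm_num : (0:Int) ≤ 1)]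
        rfl
      rw [hgetA, hgetB, hslice]
      have hA : pvInterLoopA tail (PySem.Set.ofList m) = true ↔
          ∃ t, ∀ s ∈ s0 :: srest, t ∈ s := by
        rw [pvInterLoopA_true tail _ hofne]
        constructor
        · rintro ⟨t, ht, hall⟩
          refine ⟨t, fun s hs => ?_⟩
          have : s ∈ m :: tail := by
            rw [← hsort, PySem.List.mem_sorted]; exact hs
          rcases List.mem_cons.mp this with h | h
          · exact h ▸ (PySem.Set.mem_ofList _ _).mp ht
          · exact hall s h
        · rintro ⟨t, hall⟩
          refine ⟨t, (PySem.Set.mem_ofList _ _).mpr (hall m hmmem), fun s hs => ?_⟩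
          refine hall s ?_
          rw [← PySem.List.mem_sorted (s0 :: srest) (fun s => (s.length : Int)) false, hsort]
          exact List.mem_cons_of_mem _ hs
      have hB : (s0.any fun t => (s0 :: srest).all fun s => s.contains t) = true ↔
          ∃ t, ∀ s ∈ s0 :: srest, t ∈ s := by
        simp only [List.any_eq_true, List.all_eq_true]
        constructor
        · rintro ⟨t, _ht, hall⟩
          exact ⟨t, fun s hs => by simpa using hall s hs⟩
        · rintro ⟨t, hall⟩
          exact ⟨t, hall s0 List.mem_cons_self, fun s hs => by simpa using hall s hs⟩
      exact Bool.eq_iff_iff.mpr (hA.trans hB.symm)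
  · have hval : pvCollectA combo d = none := by
      rw [pvCollectA_eq, if_neg hgood]
    rw [hval]
    have hBcond : ((pvSetsB combo d).all fun s => !s.isEmpty) = false := by
      push_neg at hgood
      obtain ⟨w, hw, hempty⟩ := hgood
      apply List.all_eq_false.mpr
      refine ⟨(PySem.Dict.mk d).getD w [], List.mem_map.mpr ⟨w, hw, rfl⟩, ?_⟩
      simp [hempty]
    rw [hBcond]
    rfl
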